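-- pv_equiv track=rewrite | github.com/anilkhatiwada/nepali_tokenizer | scripts/evaluate.py | to_boundaries
-- ===== SOURCE A (Python) =====
-- def to_boundaries(text: str, tokens: list[str]) -> set[tuple[int, int]]:
--     bounds = set()
--     i = 0
--     for t in tokens:
--         # Find t at position i; since gold/pred are derived from the same text, we assume sequential match
--         j = i + len(t)
--         bounds.add((i, j))
--         i = j
--     return bounds
-- ===== SOURCE B (Python) =====
-- def to_boundaries(text: str, tokens: list[str]) -> set[tuple[int, int]]:
--     # Divide and conquer: spans of a token list = spans of the left half,
--     # followed by spans of the right half shifted by the left half's total length.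
--     def span_list(ts):
--         # returns (list of (start, end) spans relative to offset 0, total char length)
--         if not ts:
--             return [], 0
--         if len(ts) == 1:
--             n = len(ts[0])
--             return [(0, n)], n
--         mid = len(ts) // 2
--         left, ln = span_list(ts[:mid])
--         right, rn = span_list(ts[mid:])
--         return left + [(a + ln, b + ln) for (a, b) in right], ln + rn
--     spans, _ = span_list(tokens)
--     return set(spans)
-- ===== Notes on version B (the rewrite author's own statement) =====
-- stated objective: alternative
-- what changed: Replaces A's single left-to-right pass carrying a running index with a divide-and-conquer recursion that computes the span lists of the two halves independently and shifts the right half's spans by the left half's total character length.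
import Mathlib
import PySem

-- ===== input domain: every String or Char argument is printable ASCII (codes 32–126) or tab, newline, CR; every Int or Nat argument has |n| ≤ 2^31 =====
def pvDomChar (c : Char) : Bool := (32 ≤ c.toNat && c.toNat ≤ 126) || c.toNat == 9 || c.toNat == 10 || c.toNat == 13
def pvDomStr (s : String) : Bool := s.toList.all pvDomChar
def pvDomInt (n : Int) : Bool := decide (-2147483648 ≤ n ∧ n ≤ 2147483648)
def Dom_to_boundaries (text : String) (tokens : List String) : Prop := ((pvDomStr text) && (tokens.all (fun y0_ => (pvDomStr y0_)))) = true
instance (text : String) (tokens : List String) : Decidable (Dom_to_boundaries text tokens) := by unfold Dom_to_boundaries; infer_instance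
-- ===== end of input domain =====

-- B replaces A's running-index accumulator pass with a divide-and-conquer span-list recursion (right half shifted by the left half's total length); alternative decomposition, same result.


-- ===== PORT A =====
def to_boundaries (text : String) (tokens : List String) : List (Int × Int) :=
  (tokens.foldl
    (fun (st : PySem.Set (Int × Int) × Int) t =>
      let j := st.2 + PySem.Str.len t
      (PySem.Set.add st.1 (st.2, j), j))
    (PySem.Set.empty, 0)).1

-- ===== PORT B =====
-- span_list ts: (list of (start, end) spans relative to offset 0, total char length)
def pvSpanList : List String → (List (Int × Int) × Int)
  | [] => ([], 0)
  | [t] => ([(0, PySem.Str.len t)], PySem.Str.len t)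
  | t1 :: t2 :: rest =>
    let ts := t1 :: t2 :: rest
    let mid := ts.length / 2
    let L := pvSpanList (ts.take mid)
    let R := pvSpanList (ts.drop mid)
    (L.1 ++ R.1.map (fun p => (p.1 + L.2, p.2 + L.2)), L.2 + R.2)
termination_by ts => ts.length
decreasing_by
  all_goals simp only [List.length_take, List.length_drop, List.length_cons]; omega

def to_boundaries_alt (text : String) (tokens : List String) : List (Int × Int) :=
  PySem.Set.ofList (pvSpanList tokens).1

-- ===== PRECONDITION & SPEC =====
def Spec_to_boundaries (text : String) (tokens : List String) (out : List (Int × Int)) : Prop := out = to_boundaries_alt text tokens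
instance (text : String) (tokens : List String) (out : List (Int × Int)) : Decidable (Spec_to_boundaries text tokens out) := by unfold Spec_to_boundaries; infer_instance

-- ===== CLAIM (what is proved, stated in full; the proofs are below) =====
def Claim_equal_to_boundaries : Prop := ∀ (text : String) (tokens : List String), Dom_to_boundaries text tokens → Spec_to_boundaries text tokens (to_boundaries text tokens)

-- ===== LEMMAS AND PROOFS =====

-- the sequence of spans A inserts, starting at offset i
def pvPairs (i : Int) : List String → List (Int × Int)
  | [] => []
  | t :: ts => (i, i + PySem.Str.len t) :: pvPairs (i + PySem.Str.len t) ts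

def pvTot (ts : List String) : Int := (ts.map PySem.Str.len).sum

theorem foldA (ts : List String) (s : PySem.Set (Int × Int)) (i : Int) :
    (ts.foldl
      (fun (st : PySem.Set (Int × Int) × Int) t =>
        let j := st.2 + PySem.Str.len t
        (PySem.Set.add st.1 (st.2, j), j)) (s, i)).1
    = (pvPairs i ts).foldl PySem.Set.add s := by
  induction ts generalizing s i with
  | nil => rfl
  | cons t ts ih => simpa [pvPairs] using ih (PySem.Set.add s (i, i + PySem.Str.len t)) (i + PySem.Str.len t)

theorem pvPairs_shift (ts : List String) (i c : Int) :
    pvPairs (c + i) ts = (pvPairs i ts).map (fun p => (p.1 + c, p.2 + c)) := by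
  induction ts generalizing i with
  | nil => rfl
  | cons t ts ih =>
    simp only [pvPairs, List.map_cons]
    rw [show c + i + PySem.Str.len t = c + (i + PySem.Str.len t) by ring,
      ih (i + PySem.Str.len t)]
    congr 1
    simp only [Prod.mk.injEq]
    constructor <;> ring

theorem pvPairs_append (l r : List String) (i : Int) :
    pvPairs i (l ++ r) = pvPairs i l ++ pvPairs (i + pvTot l) r := by
  induction l generalizing i with
  | nil => simp [pvPairs, pvTot]
  | cons t l ih =>
    simp only [List.cons_append, pvPairs, List.cons_append, ih, pvTot, List.map_cons,
      List.sum_cons]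
    congr 2
    ring

theorem spanList_eq (ts : List String) :
    pvSpanList ts = (pvPairs 0 ts, pvTot ts) := by
  induction ts using pvSpanList.induct with
  | case1 => simp [pvSpanList, pvPairs, pvTot]
  | case2 t => simp [pvSpanList, pvPairs, pvTot]
  | case3 t1 t2 rest ts mid ihL ihR =>
    rw [pvSpanList]
    simp only [ts, mid] at ihL ihR ⊢
    rw [ihL, ihR]
    have hsplit : t1 :: t2 :: rest
        = (t1 :: t2 :: rest).take ((t1 :: t2 :: rest).length / 2)
          ++ (t1 :: t2 :: rest).drop ((t1 :: t2 :: rest).length / 2) := by simp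
    refine Prod.ext ?_ ?_
    · show _ = pvPairs 0 (t1 :: t2 :: rest)
      conv_rhs => rw [hsplit]
      rw [pvPairs_append]
      simp only []
      congr 1
      rw [show (0 : Int) + pvTot ((t1 :: t2 :: rest).take ((t1 :: t2 :: rest).length / 2))
          = pvTot ((t1 :: t2 :: rest).take ((t1 :: t2 :: rest).length / 2)) + 0 by ring]
      rw [pvPairs_shift]
    · show _ = pvTot (t1 :: t2 :: rest)
      conv_rhs => rw [hsplit]
      simp [pvTot]

-- ===== VERDICT (by name: the statement is the Claim_ definition above) =====
theorem to_boundaries_spec : Claim_equal_to_boundaries := by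
  intro text tokens _
  unfold Spec_to_boundaries to_boundaries to_boundaries_alt
  rw [foldA tokens PySem.Set.empty 0, spanList_eq]
  rfl
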